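-- pv_equiv track=rewrite | github.com/vuuduu/CMSC-201-Exam-2 | apostrophes.py | apos
-- ===== SOURCE A (Python) =====
-- APOSTROPHE = "'"
--
-- LETTER_S = 's'
--
-- def apos(apos_string, user_string, index):
--     """
--     :param apos_string: the updated string with the added apostrophe.
--     :param user_string: the string that needed to be modify with apostrophe.
--     :param index: The position of the character in a string.
--     :return: return the updated string with apostrophe s.
--     """
--     # BASE CASE
--     if index > len(user_string) - 1:
--         return apos_string
--     else:
--
--         # This condition checks to see if the letter is S or not.
--         if user_string[index] == LETTER_S:
--
--             # This condition checks to see if the letter s is the last letter in the string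
--             if index == len(user_string) - 1:
--                 return apos(apos_string + APOSTROPHE + user_string[index], user_string, index+1)
--             else:
--
--                 # Check to see if the next character is not a letter.
--                 if not user_string[index + 1].isalnum():
--                     return apos(apos_string + APOSTROPHE + user_string[index], user_string, index+1)
--                 else:
--                     return apos(apos_string + user_string[index], user_string, index+1)
--
--         else:
--             return apos(apos_string + user_string[index], user_string, index+1)
-- ===== SOURCE B (Python) =====
-- APOSTROPHE = "'"
--
-- LETTER_S = 's'
--
-- def apos(apos_string, user_string, index):
--     result = apos_string
--     n = len(user_string)
--     for i in range(index, n):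
--         ch = user_string[i]
--         if ch == LETTER_S and (i == n - 1 or not user_string[i + 1].isalnum()):
--             result += APOSTROPHE + ch
--         else:
--             result += ch
--     return result
-- ===== Notes on version B (the rewrite author's own statement) =====
-- stated objective: idiomatic
-- what changed: Replaced the tail recursion that rebuilds the accumulator string at each character with a single iterative for-loop over range(index, len(user_string)), folding A's three nested ifs into one combined condition.
import Mathlib
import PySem

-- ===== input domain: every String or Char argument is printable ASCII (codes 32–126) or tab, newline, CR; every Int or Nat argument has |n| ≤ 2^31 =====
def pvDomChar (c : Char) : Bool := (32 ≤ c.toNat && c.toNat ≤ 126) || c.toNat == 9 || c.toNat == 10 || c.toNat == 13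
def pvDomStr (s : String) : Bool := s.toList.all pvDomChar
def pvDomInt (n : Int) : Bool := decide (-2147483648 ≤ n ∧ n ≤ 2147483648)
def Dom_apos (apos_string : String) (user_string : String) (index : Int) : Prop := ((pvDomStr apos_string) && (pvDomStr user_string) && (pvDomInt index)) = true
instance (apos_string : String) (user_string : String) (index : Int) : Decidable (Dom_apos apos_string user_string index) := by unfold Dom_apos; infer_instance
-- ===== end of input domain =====

-- B replaces A's tail recursion by an iterative loop over range(index, len) with the
-- three nested ifs folded into one condition (objective: idiomatic); same return value.


-- ===== PORT A =====
-- literal transliteration of A's recursion; strings handled as List Char (PySem convention)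
def aposA (acc : List Char) (l : List Char) (i : Int) : List Char :=
  if hbase : i > (l.length : Int) - 1 then acc
  else
    match PySem.List.pyGet? l i with
    | none => acc   -- Python raises IndexError here; excluded by Pre_apos
    | some c =>
      if c = 's' then
        if i = (l.length : Int) - 1 then aposA (acc ++ ['\'', c]) l (i + 1)
        else
          match PySem.List.pyGet? l (i + 1) with
          | none => acc   -- unreachable: i in range and i ≠ len-1 ⇒ i+1 in range
          | some c' =>
            if PySem.Chars.isalnum c' = false then aposA (acc ++ ['\'', c]) l (i + 1)
            else aposA (acc ++ [c]) l (i + 1)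
      else aposA (acc ++ [c]) l (i + 1)
termination_by ((l.length : Int) - i).toNat
decreasing_by all_goals (simp only [not_lt] at hbase; omega)

def apos (apos_string : String) (user_string : String) (index : Int) : String :=
  String.ofList (aposA apos_string.toList user_string.toList index)

-- ===== PORT B =====
-- loop body of B: append user_string[j], prefixed by an apostrophe when it is a
-- qualifying 's' (last character, or next character not alphanumeric)
def aposAltStep (l : List Char) (n : Int) (res : List Char) (j : Int) : List Char :=
  match PySem.List.pyGet? l j with
  | none => res   -- Python raises IndexError here; excluded by Pre_apos
  | some c =>
    if c == 's' && (j == n - 1 || (PySem.List.pyGet? l (j + 1)).elim true (fun c' => ! PySem.Chars.isalnum c'))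
    then res ++ ['\'', c] else res ++ [c]

def apos_alt (apos_string : String) (user_string : String) (index : Int) : String :=
  let l := user_string.toList
  let n : Int := l.length
  String.ofList ((PySem.List.pyRange index n 1).foldl (aposAltStep l n) apos_string.toList)

-- ===== PRECONDITION & SPEC =====
-- Pre_ excludes exactly the inputs where Python A raises IndexError (index below -len(user_string));
-- B raises there as well.
def Pre_apos (apos_string : String) (user_string : String) (index : Int) : Prop :=
  -(user_string.length : Int) ≤ index
instance (apos_string : String) (user_string : String) (index : Int) : Decidable (Pre_apos apos_string user_string index) := by unfold Pre_apos; infer_instance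

def pvWitness_apos : String × String × Int := ("", "dogs cats", 0)

def Spec_apos (apos_string : String) (user_string : String) (index : Int) (out : String) : Prop := out = apos_alt apos_string user_string index
instance (apos_string : String) (user_string : String) (index : Int) (out : String) : Decidable (Spec_apos apos_string user_string index out) := by unfold Spec_apos; infer_instance

-- ===== CLAIM (what is proved, stated in full; the proofs are below) =====
def Claim_equal_apos : Prop := ∀ (apos_string : String) (user_string : String) (index : Int), Dom_apos apos_string user_string index → Pre_apos apos_string user_string index → Spec_apos apos_string user_string index (apos apos_string user_string index)

-- ===== LEMMAS AND PROOFS =====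

theorem aposA_eq_foldl (l : List Char) (k : Nat) (i : Int) (acc : List Char)
    (hlo : -(l.length : Int) ≤ i) (hk : ((l.length : Int) - i).toNat = k) :
    aposA acc l i = (PySem.List.pyRange i (l.length : Int) 1).foldl (aposAltStep l (l.length : Int)) acc := by
  induction k generalizing i acc with
  | zero =>
    have hge : (l.length : Int) ≤ i := by omega
    rw [aposA, PySem.List.pyRange_one_eq_nil hge]
    simp only [List.foldl_nil]
    rw [dif_pos (by omega)]
  | succ k ih =>
    have hlt : i < (l.length : Int) := by omega
    have hin : PySem.Raise.InRange l.length i := ⟨hlo, hlt⟩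
    rw [PySem.List.pyRange_one_cons hlt, List.foldl_cons, aposA, dif_neg (by omega)]
    cases hc : PySem.List.pyGet? l i with
    | none => exact absurd ((PySem.List.pyGet?_eq_none_iff l i).mp hc) (fun h => h hin)
    | some c =>
      by_cases hcs : c = 's'
      · by_cases hlast : i = (l.length : Int) - 1
        · -- last character: both sides prepend the apostrophe
          have hstepv : aposAltStep l (l.length : Int) acc i = acc ++ ['\'', c] := by
            simp only [aposAltStep, hc]
            simp [hcs, hlast]
          rw [hstepv]
          simp only [hcs, if_pos hlast]
          exact ih (i + 1) _ (by omega) (by omega)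
        · have hin' : PySem.Raise.InRange l.length (i + 1) := ⟨by omega, by omega⟩
          cases hc' : PySem.List.pyGet? l (i + 1) with
          | none => exact absurd ((PySem.List.pyGet?_eq_none_iff l (i + 1)).mp hc') (fun h => h hin')
          | some c' =>
            by_cases hal : PySem.Chars.isalnum c' = false
            · have hstepv : aposAltStep l (l.length : Int) acc i = acc ++ ['\'', c] := by
                simp [aposAltStep, hc, hcs, hc', hal]
              rw [hstepv]
              simp only [hcs, if_neg hlast, if_pos hal]
              exact ih (i + 1) _ (by omega) (by omega)
            · have hstepv : aposAltStep l (l.length : Int) acc i = acc ++ [c] := by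
                simp only [Bool.not_eq_false] at hal
                simp [aposAltStep, hc, hcs, hc', hal, hlast]
              rw [hstepv]
              simp only [hcs, if_neg hlast, if_neg hal]
              exact ih (i + 1) _ (by omega) (by omega)
      · have hstepv : aposAltStep l (l.length : Int) acc i = acc ++ [c] := by
          simp [aposAltStep, hc, hcs]
        rw [hstepv]
        simp only [if_neg hcs]
        exact ih (i + 1) _ (by omega) (by omega)

-- ===== VERDICT (by name: the statement is the Claim_ definition above) =====
theorem apos_spec : Claim_equal_apos := by
  intro a u i _hdom hpre
  unfold Spec_apos apos apos_alt
  have hlen : (u.length : Int) = (u.toList.length : Int) := by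
    simp
  rw [aposA_eq_foldl u.toList (((u.toList.length : Int) - i).toNat) i a.toList
        (by unfold Pre_apos at hpre; omega) rfl]
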